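-- pv_equiv track=rewrite | github.com/posl/comment_recommendation | script/split_gen/5_time/zh/227_C/6.py | solve
-- ===== SOURCE A (Python) =====
-- def solve(n):
--     ans = 0
--     for i in range(1, n+1):
--         for j in range(i, n+1):
--             for k in range(j, n+1):
--                 if i*j*k <= n:
--                     if i == j and j == k:
--                         ans += 1
--                     elif i == j or j == k:
--                         ans += 3
--                     else:
--                         ans += 6
--                 else:
--                     break
--     return ans
-- ===== SOURCE B (Python) =====
-- def solve(n):
--     # A starting pair (a, b) of a sorted triple needs a*a*a <= n and b*b <= n//a;
--     # the whole run of third elements b..(n//a)//b is added in closed form.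
--     total = 0
--     a = 1
--     while a * a * a <= n:
--         q = n // a
--         b = a
--         while b * b <= q:
--             r = q // b
--             total += (1 + 3 * (r - b)) if a == b else (3 + 6 * (r - b))
--             b += 1
--         a += 1
--     return total
-- ===== Notes on version B (the rewrite author's own statement) =====
-- stated objective: faster
-- what changed: Replaces the triple nested for-loop over sorted triples by two while loops bounded by a^3 <= n and b^2 <= n//a, adding each whole run of third elements b..(n//a)//b in closed form instead of enumerating it.
import Mathlib
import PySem

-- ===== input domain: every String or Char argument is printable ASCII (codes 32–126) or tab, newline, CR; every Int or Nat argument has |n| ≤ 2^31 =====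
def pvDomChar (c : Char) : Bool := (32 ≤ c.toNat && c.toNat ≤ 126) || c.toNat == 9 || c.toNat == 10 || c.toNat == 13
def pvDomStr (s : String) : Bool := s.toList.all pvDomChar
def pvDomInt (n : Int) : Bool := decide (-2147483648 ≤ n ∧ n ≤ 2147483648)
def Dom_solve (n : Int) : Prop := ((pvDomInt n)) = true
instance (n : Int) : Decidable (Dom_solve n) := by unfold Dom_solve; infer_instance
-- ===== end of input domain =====

-- B replaces A's triple for-loop by two while loops bounded by a^3 ≤ n and b^2 ≤ n//a,
-- adding each run of third elements in closed form (measured asymptotically faster).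

-- ===== PORT A =====
-- innermost 'for k in range(j, n+1): if i*j*k <= n: … else: break', fuel = n+1-k
def solveK (n i j : Int) : Nat → Int → Int → Int
  | 0, _, ans => ans
  | fuel+1, k, ans =>
    if i*j*k ≤ n then
      solveK n i j fuel (k+1)
        (ans + (if i = j ∧ j = k then 1 else if i = j ∨ j = k then 3 else 6))
    else ans

def solve (n : Int) : Int :=
  (PySem.List.pyRange 1 (n+1) 1).foldl (fun ans i =>
    (PySem.List.pyRange i (n+1) 1).foldl (fun ans j =>
      solveK n i j (n+1-j).toNat j ans) ans) 0

-- ===== PORT B =====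
-- inner 'while b*b <= q: r = q//b; total += …; b += 1'; fuel = q+1-b (b*b ≤ q forces b ≤ q)
def altB (q a : Int) : Nat → Int → Int → Int
  | 0, _, total => total
  | f+1, b, total =>
    if b*b ≤ q then
      altB q a f (b+1)
        (total + (if a = b then 1 + 3*(PySem.Int.floordiv q b - b)
                  else 3 + 6*(PySem.Int.floordiv q b - b)))
    else total

-- outer 'while a*a*a <= n: q = n//a; …; a += 1'; fuel = n+1-a (a*a*a ≤ n forces a ≤ n)
def altA (n : Int) : Nat → Int → Int → Int
  | 0, _, total => total
  | f+1, a, total =>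
    if a*a*a ≤ n then
      altA n f (a+1)
        (altB (PySem.Int.floordiv n a) a (PySem.Int.floordiv n a + 1 - a).toNat a total)
    else total

def solve_alt (n : Int) : Int := altA n n.toNat 1 0

-- ===== PRECONDITION & SPEC =====
def Spec_solve (n : Int) (out : Int) : Prop := out = solve_alt n
instance (n : Int) (out : Int) : Decidable (Spec_solve n out) := by unfold Spec_solve; infer_instance

-- ===== CLAIM (what is proved, stated in full; the proofs are below) =====
def Claim_equal_solve : Prop := ∀ (n : Int), Dom_solve n → Spec_solve n (solve n)

-- ===== LEMMAS AND PROOFS =====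

-- k ≤ n // (i*j) characterises A's inner-loop condition
lemma cond_iff (n i j k : Int) (hb : 0 < i*j) :
    i*j*k ≤ n ↔ k ≤ PySem.Int.floordiv n (i*j) := by
  rw [PySem.Int.le_floordiv_iff_mul_le hb]
  constructor <;> intro h <;> nlinarith

-- floordiv bound: m ≥ 1 → m ≤ n (for i*j ≥ 1)
lemma m_le_n (n i j : Int) (hb : 1 ≤ i*j) (h : 1 ≤ PySem.Int.floordiv n (i*j)) :
    PySem.Int.floordiv n (i*j) ≤ n := by
  have h3 : PySem.Int.floordiv n (i*j) * (i*j) ≤ n :=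
    (PySem.Int.le_floordiv_iff_mul_le (by omega : (0:Int) < i*j)).mp le_rfl
  nlinarith

-- nested floor division: (n // a) // b = n // (a*b) for positive a, b
lemma floordiv_floordiv (n a b : Int) (ha : 0 < a) (hb : 0 < b) :
    PySem.Int.floordiv (PySem.Int.floordiv n a) b = PySem.Int.floordiv n (a*b) := by
  have hab : (0:Int) < a*b := by positivity
  have key : ∀ t : Int, t ≤ PySem.Int.floordiv (PySem.Int.floordiv n a) b ↔
      t ≤ PySem.Int.floordiv n (a*b) := by
    intro t
    rw [PySem.Int.le_floordiv_iff_mul_le hb, PySem.Int.le_floordiv_iff_mul_le ha,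
      PySem.Int.le_floordiv_iff_mul_le hab]
    constructor <;> intro h <;> nlinarith
  exact le_antisymm ((key _).mp le_rfl) ((key _).mpr le_rfl)

-- tail of A's k-loop (k > j): each step adds 3 or 6, runs to m = n // (i*j)
lemma solveK_run (n i j : Int) (hi : 1 ≤ i) (hij : i ≤ j) :
    ∀ (fuel : Nat) (k ans : Int), j < k → k ≤ PySem.Int.floordiv n (i*j) + 1 →
      fuel = ((n+1-k).toNat) →
      solveK n i j fuel k ans
        = ans + (PySem.Int.floordiv n (i*j) + 1 - k) * (if i = j then 3 else 6) := by
  intro fuel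
  induction fuel with
  | zero =>
    intro k ans hjk hkm hf
    set m := PySem.Int.floordiv n (i*j) with hm
    have hb : (0:Int) < i*j := by nlinarith
    have hkn : n + 1 - k ≤ 0 := by omega
    have hkm' : m + 1 ≤ k := by
      by_contra hc
      rw [not_le] at hc
      have h1 : 1 ≤ m := by omega
      have := m_le_n n i j (by omega) h1
      omega
    have : k = m + 1 := by omega
    simp [solveK, this]
  | succ fuel ih =>
    intro k ans hjk hkm hf
    set m := PySem.Int.floordiv n (i*j) with hm
    have hb : (0:Int) < i*j := by nlinarith
    by_cases hkm2 : k ≤ m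
    · have hcond : i*j*k ≤ n := (cond_iff n i j k hb).mpr hkm2
      have hw : (if i = j ∧ j = k then (1:Int) else if i = j ∨ j = k then 3 else 6)
          = (if i = j then 3 else 6) := by
        have : j ≠ k := by omega
        by_cases hij2 : i = j <;> simp [hij2, this]
      rw [solveK, if_pos hcond, hw,
        ih (k+1) (ans + (if i = j then 3 else 6)) (by omega) (by omega) (by omega)]
      ring
    · have : k = m + 1 := by omega
      have hcond : ¬ i*j*k ≤ n := by
        rw [cond_iff n i j k hb]; omega
      rw [solveK, if_neg hcond]
      have : m + 1 - k = 0 := by omega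
      rw [this]; ring

-- A's whole k-loop, when it runs at all (i*j*j ≤ n), in closed form
lemma solveK_closed (n i j : Int) (hi : 1 ≤ i) (hij : i ≤ j) (h : i*j*j ≤ n) (ans : Int) :
    solveK n i j ((n+1-j).toNat) j ans
      = ans + (if i = j then 1 + 3*(PySem.Int.floordiv n (i*j) - j)
               else 3 + 6*(PySem.Int.floordiv n (i*j) - j)) := by
  set m := PySem.Int.floordiv n (i*j) with hm
  have hb : (0:Int) < i*j := by nlinarith
  have hjm : j ≤ m := (cond_iff n i j j hb).mp h
  have hmn : m ≤ n := m_le_n n i j (by omega) (by omega)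
  have hfuel : (n+1-j).toNat = ((n+1-(j+1)).toNat) + 1 := by omega
  have hw1 : (if i = j ∧ j = j then (1:Int) else if i = j ∨ j = j then 3 else 6)
      = (if i = j then 1 else 3) := by
    by_cases hij2 : i = j <;> simp [hij2]
  rw [hfuel, solveK, if_pos h, hw1,
    solveK_run n i j hi hij _ (j+1) _ (by omega) (by omega) (by omega)]
  by_cases hij2 : i = j
  · rw [if_pos hij2, if_pos hij2, if_pos hij2]; ring
  · rw [if_neg hij2, if_neg hij2, if_neg hij2]; ring

-- once i*j*j > n, A's k-loop contributes nothing at once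
lemma solveK_dead (n i j : Int) (h : ¬ i*j*j ≤ n) (fuel : Nat) (ans : Int) :
    solveK n i j fuel j ans = ans := by
  cases fuel with
  | zero => simp [solveK]
  | succ fuel => rw [solveK, if_neg h]

-- the tail of A's j-loop beyond B's inner while bound contributes nothing
lemma fold_dead (n i : Int) (hi : 1 ≤ i) :
    ∀ (fuel : Nat) (j0 ans : Int), 1 ≤ j0 → n < i*j0*j0 → fuel = ((n+1-j0).toNat) →
      (PySem.List.pyRange j0 (n+1) 1).foldl
        (fun ans j => solveK n i j ((n+1-j).toNat) j ans) ans = ans := by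
  intro fuel
  induction fuel with
  | zero =>
    intro j0 ans _ _ hf
    rw [PySem.List.pyRange_one_eq_nil (by omega)]
    rfl
  | succ fuel ih =>
    intro j0 ans hj0 hdead hf
    by_cases hend : n+1 ≤ j0
    · rw [PySem.List.pyRange_one_eq_nil (by omega)]; rfl
    · have hlt : j0 < n+1 := by omega
      rw [PySem.List.pyRange_one_cons hlt, List.foldl_cons,
        solveK_dead n i j0 (by omega) _ ans]
      exact ih (j0+1) ans (by omega) (by nlinarith) (by omega)

-- B's inner condition b*b ≤ q is A's i*b*b ≤ n (q = n // a, a ≥ 1)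
lemma inner_cond_iff (n a b : Int) (ha : 1 ≤ a) :
    b*b ≤ PySem.Int.floordiv n a ↔ a*b*b ≤ n := by
  rw [PySem.Int.le_floordiv_iff_mul_le (by omega : (0:Int) < a)]
  constructor <;> intro h <;> nlinarith

-- A's j-loop from b0 equals B's inner while loop
lemma inner_eq (n a : Int) (ha : 1 ≤ a) :
    ∀ (fuel : Nat) (b0 total : Int), a ≤ b0 →
      fuel = ((PySem.Int.floordiv n a + 1 - b0).toNat) →
      (PySem.List.pyRange b0 (n+1) 1).foldl
        (fun t j => solveK n a j ((n+1-j).toNat) j t) total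
        = altB (PySem.Int.floordiv n a) a fuel b0 total := by
  intro fuel
  induction fuel with
  | zero =>
    intro b0 total hab hf
    set q := PySem.Int.floordiv n a with hq
    have hb0q : q < b0 := by omega
    have hdead : n < a*b0*b0 := by
      have h1 : ¬ b0*b0 ≤ q := by nlinarith
      have := (inner_cond_iff n a (b0) ha).not.mp h1
      omega
    rw [altB, fold_dead n a ha ((n+1-b0).toNat) b0 total (by omega) hdead rfl]
  | succ fuel ih =>
    intro b0 total hab hf
    set q := PySem.Int.floordiv n a with hq
    rw [altB]
    by_cases hc : b0*b0 ≤ q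
    · rw [if_pos hc]
      have hcn : a*b0*b0 ≤ n := (inner_cond_iff n a b0 ha).mp hc
      have hb01 : 1 ≤ b0 := by omega
      have hb0n : b0 < n+1 := by nlinarith
      have hb0q : b0 ≤ q := by nlinarith
      have hr : PySem.Int.floordiv q b0 = PySem.Int.floordiv n (a*b0) := by
        rw [hq]; exact floordiv_floordiv n a b0 (by omega) (by omega)
      rw [PySem.List.pyRange_one_cons hb0n, List.foldl_cons,
        solveK_closed n a b0 ha hab hcn total, hr,
        ih (b0+1) _ (by omega) (by omega)]
    · rw [if_neg hc]
      have hdead : n < a*b0*b0 := by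
        have := (inner_cond_iff n a b0 ha).not.mp hc
        omega
      exact fold_dead n a ha ((n+1-b0).toNat) b0 total (by omega) hdead rfl

-- once a*a*a > n, the whole rest of A's i-loop contributes nothing
lemma outer_dead (n : Int) :
    ∀ (fuel : Nat) (i0 total : Int), 1 ≤ i0 → n < i0*i0*i0 → fuel = ((n+1-i0).toNat) →
      (PySem.List.pyRange i0 (n+1) 1).foldl (fun t i =>
        (PySem.List.pyRange i (n+1) 1).foldl
          (fun t j => solveK n i j ((n+1-j).toNat) j t) t) total = total := by
  intro fuel
  induction fuel with
  | zero =>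
    intro i0 total _ _ hf
    rw [PySem.List.pyRange_one_eq_nil (by omega)]
    rfl
  | succ fuel ih =>
    intro i0 total hi0 hdead hf
    by_cases hend : n+1 ≤ i0
    · rw [PySem.List.pyRange_one_eq_nil (by omega)]; rfl
    · have hlt : i0 < n+1 := by omega
      rw [PySem.List.pyRange_one_cons hlt, List.foldl_cons,
        fold_dead n i0 (by omega) ((n+1-i0).toNat) i0 total (by omega) hdead rfl]
      exact ih (i0+1) total (by omega) (by nlinarith) (by omega)

-- A's i-loop equals B's outer while loop
lemma outer_eq (n : Int) :
    ∀ (fuel : Nat) (i0 total : Int), 1 ≤ i0 → fuel = ((n+1-i0).toNat) →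
      (PySem.List.pyRange i0 (n+1) 1).foldl (fun t i =>
        (PySem.List.pyRange i (n+1) 1).foldl
          (fun t j => solveK n i j ((n+1-j).toNat) j t) t) total
        = altA n fuel i0 total := by
  intro fuel
  induction fuel with
  | zero =>
    intro i0 total hi0 hf
    rw [PySem.List.pyRange_one_eq_nil (by omega)]
    rfl
  | succ fuel ih =>
    intro i0 total hi0 hf
    have hlt : i0 < n+1 := by omega
    rw [PySem.List.pyRange_one_cons hlt, List.foldl_cons, altA]
    by_cases hc : i0*i0*i0 ≤ n
    · rw [if_pos hc,
        ← inner_eq n i0 hi0 ((PySem.Int.floordiv n i0 + 1 - i0).toNat) i0 total le_rfl rfl]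
      exact ih (i0+1) _ (by omega) (by omega)
    · rw [if_neg hc,
        fold_dead n i0 hi0 ((n+1-i0).toNat) i0 total (by omega) (by omega) rfl]
      exact outer_dead n fuel (i0+1) total (by omega) (by nlinarith [not_le.mp hc]) (by omega)

-- ===== VERDICT (by name: the statement is the Claim_ definition above) =====
theorem solve_spec : Claim_equal_solve := by
  intro n _
  unfold Spec_solve solve solve_alt
  have : n.toNat = (n+1-1).toNat := by omega
  rw [this]
  exact outer_eq n ((n+1-1).toNat) 1 0 le_rfl rfl
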